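-- pv_equiv track=rewrite | github.com/JMVillalobos708/Traductores-de-Lenguajes-2 | MiniGeneradorLéxico.py | lexer
-- ===== SOURCE A (Python) =====
-- def is_letter(char):
--     return char.isalpha()
--
-- def is_digit(char):
--     return char.isdigit()
--
-- def lexer(input_string):
--     i = 0
--     n = len(input_string)
--     tokens = []
--     buffer = ''
--     state = 'START'
--
--     while i < n:
--         char = input_string[i]
--
--         # Switch
--         match state:
--             case 'START':
--                 if is_letter(char):
--                     buffer += char
--                     state = 'IDENTIFIER'
--                 elif is_digit(char):
--                     buffer += char
--                     state = 'INTEGER'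
--                 elif char.isspace():
--                     pass
--                 else:
--                     raise ValueError(f"Caracter inesperado en el inicio: {char}")
--
--             case 'IDENTIFIER':
--                 if is_letter(char) or is_digit(char):
--                     buffer += char
--                 else:
--                     tokens.append(("IDENTIFICADOR", buffer))
--                     buffer = ''
--                     state = 'START'
--                     i -= 1
--
--             case 'INTEGER':
--                 if is_digit(char):
--                     buffer += char
--                 elif char == '.':
--                     buffer += char
--                     state = 'REAL'
--                 else:
--                     raise ValueError(f"Se esperaba un punto decimal para números reales en: {char}")
--
--             case 'REAL':
--                 if is_digit(char):
--                     buffer += char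
--                     state = 'REAL_NUMBER'
--                 else:
--                     raise ValueError(f"Se esperaba un dígito después del punto decimal en: {char}")
--
--             case 'REAL_NUMBER':
--                 if is_digit(char):
--                     buffer += char
--                 else:
--                     tokens.append(("REAL", buffer))
--                     buffer = ''
--                     state = 'START'
--                     i -= 1
--
--         i += 1
--
--     # Manejo de buffer al final de la cadena
--     if state == 'IDENTIFIER':
--         tokens.append(("IDENTIFICADOR", buffer))
--     elif state == 'REAL_NUMBER':
--         tokens.append(("REAL", buffer))
--     elif state in ['INTEGER', 'REAL']:
--         raise ValueError(f"Entrada incompleta o malformada para un número real: {buffer}")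
--
--     return tokens
-- ===== SOURCE B (Python) =====
-- def lexer(input_string):
--     s = input_string
--     i = 0
--     n = len(s)
--     tokens = []
--     while i < n:
--         c = s[i]
--         if c.isalpha():
--             j = i + 1
--             while j < n and (s[j].isalpha() or s[j].isdigit()):
--                 j += 1
--             tokens.append(("IDENTIFICADOR", s[i:j]))
--             i = j
--         elif c.isdigit():
--             j = i + 1
--             while j < n and s[j].isdigit():
--                 j += 1
--             if j >= n:
--                 raise ValueError(f"Entrada incompleta o malformada para un número real: {s[i:j]}")
--             if s[j] != '.':
--                 raise ValueError(f"Se esperaba un punto decimal para números reales en: {s[j]}")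
--             j += 1
--             if j >= n:
--                 raise ValueError(f"Entrada incompleta o malformada para un número real: {s[i:j]}")
--             if not s[j].isdigit():
--                 raise ValueError(f"Se esperaba un dígito después del punto decimal en: {s[j]}")
--             j += 1
--             while j < n and s[j].isdigit():
--                 j += 1
--             tokens.append(("REAL", s[i:j]))
--             i = j
--         elif c.isspace():
--             i += 1
--         else:
--             raise ValueError(f"Caracter inesperado en el inicio: {c}")
--     return tokens
-- ===== Notes on version B (the rewrite author's own statement) =====
-- stated objective: faster
-- what changed: Replaced the five-state FSM with its character-by-character buffer concatenation, state variable and pushback (i -= 1) by a maximal-munch scanner: an outer position loop that per token consumes a whole alnum run, or a digit run followed by a decimal point and another digit run, and slices the lexeme out of the string; same tokens and identical ValueError messages.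
import Mathlib
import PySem

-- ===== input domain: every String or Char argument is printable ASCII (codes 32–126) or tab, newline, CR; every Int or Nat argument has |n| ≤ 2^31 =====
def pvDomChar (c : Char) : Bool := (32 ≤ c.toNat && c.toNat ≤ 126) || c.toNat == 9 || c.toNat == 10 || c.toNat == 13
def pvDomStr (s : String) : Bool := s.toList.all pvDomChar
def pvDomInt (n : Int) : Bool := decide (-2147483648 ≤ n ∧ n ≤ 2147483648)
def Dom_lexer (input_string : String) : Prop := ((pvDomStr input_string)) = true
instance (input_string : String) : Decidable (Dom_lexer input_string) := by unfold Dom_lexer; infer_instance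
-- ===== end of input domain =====

-- B replaces A's five-state FSM (with its pushback `i -= 1` trick) by a plain
-- maximal-munch scanner: skip spaces, grab a maximal alnum run after a letter,
-- or a digit run, decimal point, digit run after a digit; same tokens and errors.

-- ===== PORT A =====
-- `is_letter(char) or is_digit(char)` from A's IDENTIFIER state (also B's run predicate)
def pvAlnum (c : Char) : Bool := PySem.Chars.isalpha c || PySem.Chars.isdigit c

inductive PvSt | start | ident | intg | real | realnum
deriving DecidableEq, Repr

-- A's while-loop: position `i` becomes the remaining character list; the
-- `i -= 1; i += 1` pushback re-processes the current char in state START.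
-- Where Python raises ValueError the port returns [] (excluded by Pre_lexer).
def pvLexA : List Char → PvSt → List Char → List (String × String) → List (String × String)
  | [], st, buf, toks =>
      match st with
      | .ident => toks ++ [("IDENTIFICADOR", String.mk buf)]
      | .realnum => toks ++ [("REAL", String.mk buf)]
      | .intg => []    -- raise ValueError (entrada incompleta)
      | .real => []    -- raise ValueError (entrada incompleta)
      | .start => toks
  | c :: cs, st, buf, toks =>
      match st with
      | .start =>
          if PySem.Chars.isalpha c then pvLexA cs .ident (buf ++ [c]) toks
          else if PySem.Chars.isdigit c then pvLexA cs .intg (buf ++ [c]) toks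
          else if PySem.Chars.isspace c then pvLexA cs .start buf toks
          else []      -- raise ValueError (caracter inesperado)
      | .ident =>
          if pvAlnum c then pvLexA cs .ident (buf ++ [c]) toks
          else pvLexA (c :: cs) .start [] (toks ++ [("IDENTIFICADOR", String.mk buf)])
      | .intg =>
          if PySem.Chars.isdigit c then pvLexA cs .intg (buf ++ [c]) toks
          else if c = '.' then pvLexA cs .real (buf ++ [c]) toks
          else []      -- raise ValueError (se esperaba un punto decimal)
      | .real =>
          if PySem.Chars.isdigit c then pvLexA cs .realnum (buf ++ [c]) toks
          else []      -- raise ValueError (se esperaba un dígito)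
      | .realnum =>
          if PySem.Chars.isdigit c then pvLexA cs .realnum (buf ++ [c]) toks
          else pvLexA (c :: cs) .start [] (toks ++ [("REAL", String.mk buf)])
termination_by cs st _ _ => (cs.length, if st = .start then 0 else 1)
decreasing_by all_goals simp_all [Prod.lex_iff]

def lexer (input_string : String) : List (String × String) :=
  pvLexA input_string.toList .start [] []

-- ===== PORT B =====
-- maximal-munch scanner (Source B); errors return [] (excluded by Pre_lexer)
def pvLexB : List Char → List (String × String)
  | [] => []
  | c :: cs =>
      if PySem.Chars.isalpha c then
        ("IDENTIFICADOR", String.mk (c :: cs.takeWhile pvAlnum)) :: pvLexB (cs.dropWhile pvAlnum)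
      else if PySem.Chars.isdigit c then
        match h : cs.dropWhile PySem.Chars.isdigit with
        | '.' :: d :: t =>
            if PySem.Chars.isdigit d then
              ("REAL", String.mk (c :: cs.takeWhile PySem.Chars.isdigit ++ '.' :: d :: t.takeWhile PySem.Chars.isdigit))
                :: pvLexB (t.dropWhile PySem.Chars.isdigit)
            else []   -- raise: se esperaba un dígito después del punto
        | _ => []     -- raise: punto decimal faltante / entrada incompleta
      else if PySem.Chars.isspace c then pvLexB cs
      else []         -- raise: caracter inesperado
termination_by cs => cs.length
decreasing_by
  · simpa using Nat.lt_succ_of_le (List.length_dropWhile_le _ _)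
  · have h1 : (cs.dropWhile PySem.Chars.isdigit).length ≤ cs.length :=
      List.length_dropWhile_le _ _
    rw [h] at h1
    have h2 : (t.dropWhile PySem.Chars.isdigit).length ≤ t.length :=
      List.length_dropWhile_le _ _
    simp at h1 ⊢
    omega
  · simp

def lexer_alt (input_string : String) : List (String × String) :=
  pvLexB input_string.toList

-- ===== PRECONDITION & SPEC =====
-- Membership of the input in the regular token language
-- (space | letter alnum* | digit+ '.' digit+)* : acceptance by the token DFA,
-- computing no tokens.  This holds exactly when Python A returns instead of
-- raising ValueError; Pre_lexer excludes exactly the raising inputs.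
def pvOkF : List Char → PvSt → Bool
  | [], st => st = .start || st = .ident || st = .realnum
  | c :: cs, st =>
      match st with
      | .start =>
          if PySem.Chars.isalpha c then pvOkF cs .ident
          else if PySem.Chars.isdigit c then pvOkF cs .intg
          else PySem.Chars.isspace c && pvOkF cs .start
      | .ident =>
          if pvAlnum c then pvOkF cs .ident
          else PySem.Chars.isspace c && pvOkF cs .start
      | .intg =>
          if PySem.Chars.isdigit c then pvOkF cs .intg
          else if c = '.' then pvOkF cs .real
          else false
      | .real => PySem.Chars.isdigit c && pvOkF cs .realnum
      | .realnum =>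
          if PySem.Chars.isdigit c then pvOkF cs .realnum
          else if PySem.Chars.isalpha c then pvOkF cs .ident
          else PySem.Chars.isspace c && pvOkF cs .start

-- Pre_lexer excludes exactly the inputs on which Python A raises ValueError.
def Pre_lexer (input_string : String) : Prop := pvOkF input_string.toList .start = true
instance (input_string : String) : Decidable (Pre_lexer input_string) := by
  unfold Pre_lexer; infer_instance

def pvWitness_lexer : String := "x1 3.14"

def Spec_lexer (input_string : String) (out : List (String × String)) : Prop := out = lexer_alt input_string
instance (input_string : String) (out : List (String × String)) : Decidable (Spec_lexer input_string out) := by unfold Spec_lexer; infer_instance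

-- ===== CLAIM (what is proved, stated in full; the proofs are below) =====
def Claim_equal_lexer : Prop := ∀ (input_string : String), Dom_lexer input_string → Pre_lexer input_string → Spec_lexer input_string (lexer input_string)

-- ===== LEMMAS AND PROOFS =====

-- In state IDENTIFIER, A consumes the maximal alnum run, emits it, and resumes in START.
theorem pvLexA_ident (cs : List Char) (buf : List Char) (toks : List (String × String)) :
    pvLexA cs .ident buf toks =
      pvLexA (cs.dropWhile pvAlnum) .start []
        (toks ++ [("IDENTIFICADOR", String.mk (buf ++ cs.takeWhile pvAlnum))]) := by
  induction cs generalizing buf toks with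
  | nil => simp [pvLexA]
  | cons c cs ih =>
      by_cases h : pvAlnum c = true
      · rw [List.dropWhile_cons_of_pos h, List.takeWhile_cons_of_pos h]
        simp only [pvLexA, h, if_pos]
        rw [ih]
        simp
      · rw [List.dropWhile_cons_of_neg h, List.takeWhile_cons_of_neg h]
        simp only [pvLexA, h, if_neg, Bool.false_eq_true, not_false_iff]
        simp

-- In state REAL_NUMBER, A consumes the maximal digit run, emits it, and resumes in START.
theorem pvLexA_realnum (cs : List Char) (buf : List Char) (toks : List (String × String)) :
    pvLexA cs .realnum buf toks =
      pvLexA (cs.dropWhile PySem.Chars.isdigit) .start []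
        (toks ++ [("REAL", String.mk (buf ++ cs.takeWhile PySem.Chars.isdigit))]) := by
  induction cs generalizing buf toks with
  | nil => simp [pvLexA]
  | cons c cs ih =>
      by_cases h : PySem.Chars.isdigit c = true
      · rw [List.dropWhile_cons_of_pos h, List.takeWhile_cons_of_pos h]
        simp only [pvLexA, h, if_pos]
        rw [ih]
        simp
      · rw [List.dropWhile_cons_of_neg h, List.takeWhile_cons_of_neg h]
        simp only [pvLexA, h, if_neg, Bool.false_eq_true, not_false_iff]
        simp

-- In state INTEGER, A consumes the digit run and then demands a '.'.
theorem pvLexA_intg (cs : List Char) (buf : List Char) (toks : List (String × String)) :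
    pvLexA cs .intg buf toks =
      (match cs.dropWhile PySem.Chars.isdigit with
       | '.' :: rest => pvLexA rest .real (buf ++ cs.takeWhile PySem.Chars.isdigit ++ ['.']) toks
       | _ => []) := by
  induction cs generalizing buf toks with
  | nil => simp [pvLexA]
  | cons c cs ih =>
      by_cases h : PySem.Chars.isdigit c = true
      · rw [List.dropWhile_cons_of_pos h, List.takeWhile_cons_of_pos h]
        simp only [pvLexA, h, if_pos]
        rw [ih]
        rcases hdw : cs.dropWhile PySem.Chars.isdigit with _ | ⟨c', rest⟩ <;> simp
      · rw [List.dropWhile_cons_of_neg h, List.takeWhile_cons_of_neg h]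
        by_cases hdot : c = '.'
        · subst hdot
          simp only [pvLexA, h, if_neg, Bool.false_eq_true, not_false_iff]
          simp
        · simp only [pvLexA, h, Bool.false_eq_true, if_neg, not_false_iff, hdot]
          simp [hdot]

-- pvLexB on a digit-led input whose digit run is followed by '.' digit
theorem pvLexB_cons_digit (c : Char) (cs : List Char)
    (ha : ¬ PySem.Chars.isalpha c = true) (hd : PySem.Chars.isdigit c = true)
    (d : Char) (t : List Char)
    (hdw : cs.dropWhile PySem.Chars.isdigit = '.' :: d :: t)
    (hdd : PySem.Chars.isdigit d = true) :
    pvLexB (c :: cs) =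
      ("REAL", String.mk (c :: cs.takeWhile PySem.Chars.isdigit ++ '.' :: d :: t.takeWhile PySem.Chars.isdigit))
        :: pvLexB (t.dropWhile PySem.Chars.isdigit) := by
  rw [pvLexB, if_neg ha, if_pos hd]
  split
  · next d' t' hdw' =>
      have h2 := hdw.symm.trans hdw'
      injection h2 with _ h3
      injection h3 with h4 h5
      subst h4; subst h5
      rw [if_pos hdd]
  · next hne => exact absurd hdw (by intro hc; exact hne _ _ hc)

-- DFA acceptance from IDENTIFIER equals acceptance from START after the alnum run
theorem pvOkF_ident (cs : List Char) :
    pvOkF cs .ident = pvOkF (cs.dropWhile pvAlnum) .start := by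
  induction cs with
  | nil => simp [pvOkF]
  | cons c cs ih =>
      by_cases h : pvAlnum c = true
      · rw [List.dropWhile_cons_of_pos h]
        simp only [pvOkF, h, if_pos]
        exact ih
      · rw [List.dropWhile_cons_of_neg h]
        have ha : ¬ PySem.Chars.isalpha c = true := by
          intro hc; exact h (by simp [pvAlnum, hc])
        have hd : ¬ PySem.Chars.isdigit c = true := by
          intro hc; exact h (by simp [pvAlnum, hc])
        simp [pvOkF, h, ha, hd]

-- DFA acceptance from REAL_NUMBER equals acceptance from START after the digit run
theorem pvOkF_realnum (cs : List Char) :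
    pvOkF cs .realnum = pvOkF (cs.dropWhile PySem.Chars.isdigit) .start := by
  induction cs with
  | nil => simp [pvOkF]
  | cons c cs ih =>
      by_cases h : PySem.Chars.isdigit c = true
      · rw [List.dropWhile_cons_of_pos h]
        simp only [pvOkF, h, if_pos]
        exact ih
      · rw [List.dropWhile_cons_of_neg h]
        simp [pvOkF, h]

-- DFA acceptance from INTEGER: the digit run must be followed by '.'
theorem pvOkF_intg (cs : List Char) :
    pvOkF cs .intg =
      (match cs.dropWhile PySem.Chars.isdigit with
       | '.' :: rest => pvOkF rest .real
       | _ => false) := by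
  induction cs with
  | nil => simp [pvOkF]
  | cons c cs ih =>
      by_cases h : PySem.Chars.isdigit c = true
      · rw [List.dropWhile_cons_of_pos h]
        simp only [pvOkF, h, if_pos]
        exact ih
      · rw [List.dropWhile_cons_of_neg h]
        by_cases hdot : c = '.'
        · subst hdot; simp [pvOkF, h]
        · simp [pvOkF, h, hdot]

theorem pv_main (cs : List Char) (h : pvOkF cs .start = true) (toks : List (String × String)) :
    pvLexA cs .start [] toks = toks ++ pvLexB cs := by
  match cs with
  | [] => simp [pvLexA, pvLexB]
  | c :: cs =>
    by_cases ha : PySem.Chars.isalpha c = true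
    · rw [pvOkF] at h
      simp only [ha, if_pos] at h
      rw [pvOkF_ident] at h
      have hlen : (cs.dropWhile pvAlnum).length ≤ cs.length := List.length_dropWhile_le _ _
      simp only [pvLexA, ha, if_pos]
      rw [pvLexA_ident, pv_main (cs.dropWhile pvAlnum) h]
      rw [pvLexB, if_pos ha]
      simp
    · by_cases hd : PySem.Chars.isdigit c = true
      · rw [pvOkF] at h
        simp only [ha, Bool.false_eq_true, if_neg, not_false_iff, hd, if_pos] at h
        rw [pvOkF_intg] at h
        split at h
        next rest hdw =>
          match rest with
          | [] => simp [pvOkF] at h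
          | d :: t =>
            rw [pvOkF] at h
            simp only [Bool.and_eq_true] at h
            obtain ⟨hdd, hok⟩ := h
            rw [pvOkF_realnum] at hok
            have hlen1 : (cs.dropWhile PySem.Chars.isdigit).length ≤ cs.length :=
              List.length_dropWhile_le _ _
            rw [hdw] at hlen1
            have hlen2 : (t.dropWhile PySem.Chars.isdigit).length ≤ t.length :=
              List.length_dropWhile_le _ _
            simp only [List.length_cons] at hlen1
            simp only [pvLexA, ha, Bool.false_eq_true, if_neg, not_false_iff, hd, if_pos]
            rw [pvLexA_intg, hdw]
            simp only [pvLexA, hdd, if_pos]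
            rw [pvLexA_realnum, pv_main (t.dropWhile PySem.Chars.isdigit) hok]
            rw [pvLexB_cons_digit c cs ha hd d t hdw hdd]
            simp
        next => simp at h
      · by_cases hs : PySem.Chars.isspace c = true
        · rw [pvOkF] at h
          simp only [ha, Bool.false_eq_true, if_neg, not_false_iff, hd, hs, Bool.true_and] at h
          simp only [pvLexA, ha, Bool.false_eq_true, if_neg, not_false_iff, hd, hs, if_pos]
          rw [pv_main cs h]
          rw [pvLexB, if_neg (by simp [ha]), if_neg (by simp [hd]), if_pos hs]
        · rw [pvOkF] at h
          simp [ha, hd, hs] at h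
termination_by cs.length
decreasing_by
  · simpa using Nat.lt_succ_of_le hlen
  · rw [hdw] at hlen1
    simp only [List.length_cons] at hlen1 ⊢
    omega
  · simp

-- ===== VERDICT (by name: the statement is the Claim_ definition above) =====
theorem lexer_spec : Claim_equal_lexer := by
  intro s _ hpre
  unfold Spec_lexer lexer lexer_alt
  simpa using pv_main s.toList hpre []
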